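-- pv_equiv track=rewrite | github.com/Donny-GUI/loz | util.py | width_between_sprites_simplified
-- ===== SOURCE A (Python) =====
-- def width_between_sprites_simplified(pixels: list[list[tuple]]):
--     """
--     scans the pixels row by row and counts the width between patches of non-transparent pixels.
--     It tracks whether it is currently inside a patch using the is_inside_patch flag.
--     The counter keeps track of the width between patches,
--     and the width_between variable stores the maximum width encountered.
--     The function returns the final width_between value.
--     """
--     invisible_pixel = pixels[0][0]
--     width_between   = 0
--     is_inside_patch = False
--     counter         = 0
--
--     for row in pixels:
--         for px in row:
--             if px == invisible_pixel:
--                 if is_inside_patch: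
--                     counter += 1
--             else:
--                 if is_inside_patch:
--                     if counter > width_between:
--                         width_between = counter
--                     counter = 0
--                 else:
--                     is_inside_patch = True
--
--     return width_between
-- ===== SOURCE B (Python) =====
-- def width_between_sprites_simplified(pixels: list[list[tuple]]):
--     invisible_pixel = pixels[0][0]
--     flat = [px for row in pixels for px in row]
--     idx = [i for i, px in enumerate(flat) if px != invisible_pixel]
--     return max((b - a - 1 for a, b in zip(idx, idx[1:])), default=0)
-- ===== Notes on version B (the rewrite author's own statement) =====
-- stated objective: alternative
-- what changed: Replaces the inline is_inside_patch/counter state machine with a data-flow pipeline: flatten the grid, collect the indices of non-transparent pixels, and take the max of consecutive-index differences minus one (default 0).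
import Mathlib
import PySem

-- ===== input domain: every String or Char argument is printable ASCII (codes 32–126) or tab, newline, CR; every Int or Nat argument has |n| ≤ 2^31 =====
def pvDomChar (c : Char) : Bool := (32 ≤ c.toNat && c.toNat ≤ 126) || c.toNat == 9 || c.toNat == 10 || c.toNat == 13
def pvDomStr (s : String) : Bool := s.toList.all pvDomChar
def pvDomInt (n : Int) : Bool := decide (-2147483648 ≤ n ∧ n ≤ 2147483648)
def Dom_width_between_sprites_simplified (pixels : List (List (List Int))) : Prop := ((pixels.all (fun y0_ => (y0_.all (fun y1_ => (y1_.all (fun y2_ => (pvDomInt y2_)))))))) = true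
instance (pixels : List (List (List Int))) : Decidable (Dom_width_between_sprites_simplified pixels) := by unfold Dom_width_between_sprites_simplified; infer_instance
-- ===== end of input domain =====

-- B replaces A's inline flag/counter state machine with a pipeline (flatten, collect
-- non-transparent indices, max of consecutive gaps); alternative decomposition, same cost.

-- ===== PORT A =====
-- body of A's double loop: state (width_between, is_inside_patch, counter)
def pvStepA (inv : List Int) (st : Int × Bool × Int) (px : List Int) : Int × Bool × Int :=
  if px = inv then
    if st.2.1 then (st.1, st.2.1, st.2.2 + 1) else st
  else
    if st.2.1 then ((if st.2.2 > st.1 then st.2.2 else st.1), st.2.1, 0)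
    else (st.1, true, st.2.2)

def width_between_sprites_simplified (pixels : List (List (List Int))) : Int :=
  match PySem.List.pyGet? pixels 0 with
  | none => 0      -- pixels[0] raises IndexError (outside Pre_)
  | some row0 =>
    match PySem.List.pyGet? row0 0 with
    | none => 0    -- pixels[0][0] raises IndexError (outside Pre_)
    | some inv =>
      (pixels.foldl (fun st row => row.foldl (pvStepA inv) st) (0, false, 0)).1

-- ===== PORT B =====
def width_between_sprites_simplified_alt (pixels : List (List (List Int))) : Int :=
  match PySem.List.pyGet? pixels 0 with
  | none => 0      -- pixels[0] raises IndexError (outside Pre_)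
  | some row0 =>
    match PySem.List.pyGet? row0 0 with
    | none => 0    -- pixels[0][0] raises IndexError (outside Pre_)
    | some inv =>
      let flat := pixels.flatten
      let idx := ((PySem.List.enumerate flat 0).filter (fun p => p.2 ≠ inv)).map (·.1)
      match PySem.List.max? ((idx.zip (idx.drop 1)).map (fun p => p.2 - p.1 - 1)) (fun y => y) with
      | none => 0
      | some m => m

-- ===== PRECONDITION & SPEC =====
-- Pre_ excludes exactly the inputs where pixels[0][0] raises IndexError in both A and B
-- (empty grid or empty first row).
def Pre_width_between_sprites_simplified (pixels : List (List (List Int))) : Prop :=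
  pixels ≠ [] ∧ pixels.headI ≠ []
instance (pixels : List (List (List Int))) : Decidable (Pre_width_between_sprites_simplified pixels) := by unfold Pre_width_between_sprites_simplified; infer_instance

def pvWitness_width_between_sprites_simplified : List (List (List Int)) :=
  [[[0], [1], [0]], [[0], [2]]]

def Spec_width_between_sprites_simplified (pixels : List (List (List Int))) (out : Int) : Prop := out = width_between_sprites_simplified_alt pixels
instance (pixels : List (List (List Int))) (out : Int) : Decidable (Spec_width_between_sprites_simplified pixels out) := by unfold Spec_width_between_sprites_simplified; infer_instance

-- ===== CLAIM (what is proved, stated in full; the proofs are below) =====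
def Claim_equal_width_between_sprites_simplified : Prop := ∀ (pixels : List (List (List Int))), Dom_width_between_sprites_simplified pixels → Pre_width_between_sprites_simplified pixels → Spec_width_between_sprites_simplified pixels (width_between_sprites_simplified pixels)

-- ===== LEMMAS AND PROOFS =====

-- positions (from offset n) of the pixels ≠ inv
def pvPosns (inv : List Int) (n : Int) : List (List Int) → List Int
  | [] => []
  | x :: l => if x = inv then pvPosns inv (n + 1) l else n :: pvPosns inv (n + 1) l

-- max-of-gaps scan given the position of the previous non-transparent pixel
def pvMgap2 (best prev : Int) : List Int → Int
  | [] => best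
  | k :: ks => pvMgap2 (max best (k - prev - 1)) k ks

def pvMgap0 (wb : Int) : List Int → Int
  | [] => wb
  | k :: ks => pvMgap2 wb k ks

def pvZipdiff (ks : List Int) : List Int := (ks.zip (ks.drop 1)).map (fun p => p.2 - p.1 - 1)

theorem pvPosns_ge (inv : List Int) (l : List (List Int)) : ∀ n x, x ∈ pvPosns inv n l → n ≤ x := by
  induction l with
  | nil => intro n x h; simp [pvPosns] at h
  | cons a l ih =>
    intro n x h
    by_cases ha : a = inv
    · rw [pvPosns, if_pos ha] at h
      have := ih (n + 1) x h; omega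
    · rw [pvPosns, if_neg ha] at h
      rcases List.mem_cons.mp h with h | h
      · omega
      · have := ih (n + 1) x h; omega

theorem pvPosns_pairwise (inv : List Int) (l : List (List Int)) :
    ∀ n, (pvPosns inv n l).Pairwise (· < ·) := by
  induction l with
  | nil => intro n; simp [pvPosns]
  | cons a l ih =>
    intro n
    by_cases ha : a = inv
    · rw [pvPosns, if_pos ha]; exact ih (n + 1)
    · rw [pvPosns, if_neg ha]
      refine List.pairwise_cons.mpr ⟨?_, ih (n + 1)⟩
      intro y hy
      have := pvPosns_ge inv l (n + 1) y hy
      omega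

theorem pvMgap2_eq_foldl (ks : List Int) :
    ∀ best prev, pvMgap2 best prev ks = List.foldl max best (pvZipdiff (prev :: ks)) := by
  induction ks with
  | nil => intro best prev; simp [pvMgap2, pvZipdiff]
  | cons k ks ih =>
    intro best prev
    rw [pvMgap2]
    have hz : pvZipdiff (prev :: k :: ks) = (k - prev - 1) :: pvZipdiff (k :: ks) := by
      simp [pvZipdiff]
    rw [hz, List.foldl_cons]
    exact ih (max best (k - prev - 1)) k

-- A's inner loop once inside a patch
theorem pvFoldA_true (inv : List Int) (l : List (List Int)) :
    ∀ n wb cnt, (List.foldl (pvStepA inv) (wb, true, cnt) l).1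
      = pvMgap2 wb (n - cnt - 1) (pvPosns inv n l) := by
  induction l with
  | nil => intro n wb cnt; simp [pvPosns, pvMgap2]
  | cons x l ih =>
    intro n wb cnt
    rw [List.foldl_cons]
    by_cases hx : x = inv
    · have hstep : pvStepA inv (wb, true, cnt) x = (wb, true, cnt + 1) := by
        simp [pvStepA, hx]
      rw [hstep, ih (n + 1) wb (cnt + 1), pvPosns, if_pos hx]
      have e : (n + 1 : Int) - (cnt + 1) - 1 = n - cnt - 1 := by omega
      rw [e]
    · have hstep : pvStepA inv (wb, true, cnt) x = ((if cnt > wb then cnt else wb), true, 0) := by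
        simp [pvStepA, hx]
      rw [hstep, ih (n + 1) (if cnt > wb then cnt else wb) 0, pvPosns, if_neg hx, pvMgap2]
      have e1 : (if cnt > wb then cnt else wb) = max wb (n - (n - cnt - 1) - 1) := by
        rw [max_def]; split_ifs <;> omega
      have e2 : (n + 1 : Int) - 0 - 1 = n := by omega
      rw [e1, e2]

-- A's loop before the first non-transparent pixel
theorem pvFoldA_false (inv : List Int) (l : List (List Int)) :
    ∀ n wb, (List.foldl (pvStepA inv) (wb, false, 0) l).1 = pvMgap0 wb (pvPosns inv n l) := by
  induction l with
  | nil => intro n wb; simp [pvPosns, pvMgap0]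
  | cons x l ih =>
    intro n wb
    rw [List.foldl_cons]
    by_cases hx : x = inv
    · have hstep : pvStepA inv (wb, false, 0) x = (wb, false, 0) := by
        simp [pvStepA, hx]
      rw [hstep, ih (n + 1) wb, pvPosns, if_pos hx]
    · have hstep : pvStepA inv (wb, false, 0) x = (wb, true, 0) := by
        simp [pvStepA, hx]
      rw [hstep, pvFoldA_true inv l (n + 1) wb 0, pvPosns, if_neg hx, pvMgap0]
      have e : (n + 1 : Int) - 0 - 1 = n := by omega
      rw [e]

-- B's index list is pvPosns
theorem pvIdx_eq_posns (inv : List Int) (l : List (List Int)) :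
    ∀ n, ((PySem.List.enumerate l n).filter (fun p => p.2 ≠ inv)).map (·.1) = pvPosns inv n l := by
  induction l with
  | nil => intro n; simp [PySem.List.enumerate_nil, pvPosns]
  | cons x l ih =>
    intro n
    rw [PySem.List.enumerate_cons]
    by_cases hx : x = inv
    · rw [List.filter_cons_of_neg (by simp [hx]), ih (n + 1), pvPosns, if_pos hx]
    · rw [List.filter_cons_of_pos (by simp [hx]), List.map_cons, ih (n + 1), pvPosns, if_neg hx]

-- B's max-with-default over the gaps equals the running-max scan, for increasing positions
theorem pvMaxD_eq (ks : List Int) (hp : ks.Pairwise (· < ·)) :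
    (match PySem.List.max? (pvZipdiff ks) (fun y => y) with
     | none => (0 : Int)
     | some m => m) = pvMgap0 0 ks := by
  match ks with
  | [] => simp [pvZipdiff, PySem.List.max?, pvMgap0]
  | [a] => simp [pvZipdiff, PySem.List.max?, pvMgap0, pvMgap2]
  | a :: b :: rest =>
    have hab : a < b := (List.pairwise_cons.mp hp).1 b (by simp)
    have hz : pvZipdiff (a :: b :: rest) = (b - a - 1) :: pvZipdiff (b :: rest) := by
      simp [pvZipdiff]
    rw [hz, PySem.List.max?_id_cons]
    show List.foldl max (b - a - 1) (pvZipdiff (b :: rest)) = pvMgap0 0 (a :: b :: rest)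
    rw [pvMgap0, pvMgap2_eq_foldl, hz, List.foldl_cons,
      max_eq_right (by omega : (0 : Int) ≤ b - a - 1)]

-- ===== VERDICT (by name: the statement is the Claim_ definition above) =====
theorem width_between_sprites_simplified_spec : Claim_equal_width_between_sprites_simplified := by
  intro pixels _ _
  unfold Spec_width_between_sprites_simplified
  unfold width_between_sprites_simplified width_between_sprites_simplified_alt
  cases h0 : PySem.List.pyGet? pixels 0 with
  | none => rfl
  | some row0 =>
    dsimp only
    cases h1 : PySem.List.pyGet? row0 0 with
    | none => rfl
    | some inv =>
      dsimp only
      rw [← List.foldl_flatten, pvFoldA_false inv pixels.flatten 0 0,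
        pvIdx_eq_posns inv pixels.flatten 0]
      exact (pvMaxD_eq (pvPosns inv 0 pixels.flatten)
        (pvPosns_pairwise inv pixels.flatten 0)).symm
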